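-- pv_equiv track=rewrite | github.com/ath-rja/AwsIBox | awsibox/RP.py | replace_not_allowed_char
-- ===== SOURCE A (Python) =====
-- def replace_not_allowed_char(s):
--     key = str(s)
--     for s, w in {
--             '/': 'SLASH',
--             '*': 'STAR',
--             '-': 'HYPH',
--             '?': 'QUEST',
--             '.': 'DOT',
--             '_': 'USCORE',
--     }.items():
--         key = key.replace(s, w)
--
--     return int(key) if key.isdigit() else key
-- ===== SOURCE B (Python) =====
-- def replace_not_allowed_char(s):
--     mapping = {
--         '/': 'SLASH',
--         '*': 'STAR',
--         '-': 'HYPH',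
--         '?': 'QUEST',
--         '.': 'DOT',
--         '_': 'USCORE',
--     }
--     out = []
--     for ch in str(s):
--         out.append(mapping.get(ch, ch))
--     key = ''.join(out)
--     return int(key) if key.isdigit() else key
-- ===== Notes on version B (the rewrite author's own statement) =====
-- stated objective: alternative
-- what changed: Six sequential full-string str.replace passes are replaced by one single character-by-character pass that appends mapping.get(c, c) for each character and joins once at the end; Pre_ excludes non-empty all-digit strings, on which both programs return a Python int rather than a str.
-- outside the precondition, e.g. on replace_not_allowed_char('007'): A returns 7, B returns 7
import Mathlib
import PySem

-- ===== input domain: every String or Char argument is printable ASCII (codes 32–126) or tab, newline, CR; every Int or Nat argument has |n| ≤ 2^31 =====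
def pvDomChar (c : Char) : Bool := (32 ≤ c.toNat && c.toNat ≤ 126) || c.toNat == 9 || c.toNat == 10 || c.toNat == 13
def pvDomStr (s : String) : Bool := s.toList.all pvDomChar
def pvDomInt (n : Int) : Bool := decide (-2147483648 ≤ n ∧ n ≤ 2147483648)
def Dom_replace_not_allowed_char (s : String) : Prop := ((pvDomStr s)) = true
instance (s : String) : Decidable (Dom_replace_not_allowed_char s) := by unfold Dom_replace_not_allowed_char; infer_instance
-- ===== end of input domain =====

-- ===== PORT A =====
-- B replaces six sequential whole-string replace passes by one per-character pass; same return value.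
def replace_not_allowed_char (s : String) : String :=
  let key := s
  let key := List.foldl (fun k (p : String × String) => PySem.Str.replace k p.1 p.2) key
    [("/", "SLASH"), ("*", "STAR"), ("-", "HYPH"), ("?", "QUEST"), (".", "DOT"), ("_", "USCORE")]
  if PySem.Str.strIsdigit key then PySem.Int.toStr ((PySem.Int.ofStr? key).getD 0) else key

-- ===== PORT B =====
def pvMapping : PySem.Dict Char (List Char) :=
  PySem.Dict.mk [('/', "SLASH".toList), ('*', "STAR".toList), ('-', "HYPH".toList),
                 ('?', "QUEST".toList), ('.', "DOT".toList), ('_', "USCORE".toList)]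

def replace_not_allowed_char_alt (s : String) : String :=
  let out := s.toList.foldl (fun acc c => acc ++ [pvMapping.getD c [c]]) []
  let key := String.ofList (PySem.Chars.join [] out)
  if PySem.Str.strIsdigit key then PySem.Int.toStr ((PySem.Int.ofStr? key).getD 0) else key

-- ===== PRECONDITION & SPEC =====
-- Pre_ excludes inputs that are non-empty strings of ASCII digits: there A (and B) return a Python int
-- (e.g. int('007') = 7), a value outside the declared return type str, so the String-typed claim cannot cover them.
def Pre_replace_not_allowed_char (s : String) : Prop :=
  ¬ (s.toList ≠ [] ∧ s.toList.all (fun c => '0' ≤ c ∧ c ≤ '9'))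
instance (s : String) : Decidable (Pre_replace_not_allowed_char s) := by unfold Pre_replace_not_allowed_char; infer_instance
def pvWitness_replace_not_allowed_char : String := "a/b-c"

def Spec_replace_not_allowed_char (s : String) (out : String) : Prop := out = replace_not_allowed_char_alt s
instance (s : String) (out : String) : Decidable (Spec_replace_not_allowed_char s out) := by unfold Spec_replace_not_allowed_char; infer_instance

-- ===== CLAIM (what is proved, stated in full; the proofs are below) =====
def Claim_equal_replace_not_allowed_char : Prop := ∀ (s : String), Dom_replace_not_allowed_char s → Pre_replace_not_allowed_char s → Spec_replace_not_allowed_char s (replace_not_allowed_char s)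

-- ===== LEMMAS AND PROOFS =====

-- single-char pattern: Python's str.replace is exactly per-character substitution
lemma go_single (o : Char) (new : List Char) :
    ∀ (l : List Char) (fuel : Nat) (acc : List Char), l.length ≤ fuel →
      PySem.Chars.replace.go [o] new fuel l acc
        = acc.reverse ++ l.flatMap (fun c => if c = o then new else [c]) := by
  intro l
  induction l with
  | nil =>
    intro fuel acc _
    cases fuel <;> simp [PySem.Chars.replace.go]
  | cons c t ih =>
    intro fuel acc h
    cases fuel with
    | zero => simp at h
    | succ fuel =>
      by_cases hc : c = o
      · have hpre : List.isPrefixOf [o] (c :: t) = true := by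
          simp [List.isPrefixOf, hc]
        rw [PySem.Chars.replace.go, if_pos hpre]
        simp only [List.length_cons] at h
        rw [show List.drop [o].length (c :: t) = t by simp]
        rw [ih fuel _ (by omega)]
        simp [hc]
      · have hpre : List.isPrefixOf [o] (c :: t) = false := by
          simp [List.isPrefixOf]
          intro h'; exact absurd h'.symm hc
        rw [PySem.Chars.replace.go, if_neg (by simp [hpre])]
        simp only [List.length_cons] at h
        rw [ih fuel _ (by omega)]
        simp [hc]

lemma replace_single (cs : List Char) (o : Char) (new : List Char) :
    PySem.Chars.replace cs [o] new = cs.flatMap (fun c => if c = o then new else [c]) := by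
  rw [PySem.Chars.replace]
  simp only [List.isEmpty_cons, if_false, Bool.false_eq_true]
  exact go_single o new cs cs.length [] (le_refl _)

lemma join_nil_flatten (parts : List (List Char)) :
    PySem.Chars.join [] parts = parts.flatten := by
  simp only [PySem.Chars.join]
  induction parts with
  | nil => rfl
  | cons p ps ih =>
    cases ps with
    | nil => simp [List.intercalate]
    | cons q qs => simp_all [List.intercalate, List.intersperse]

-- the composed six per-character substitutions equal B's single dict lookup, char by char
lemma chain_char (c : Char) :
    List.flatMap
        (fun x =>
          List.flatMap
            (fun x =>
              List.flatMap
                (fun x =>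
                  List.flatMap
                    (fun x =>
                      List.flatMap (fun x => if x = '_' then "USCORE".toList else [x])
                        (if x = '.' then "DOT".toList else [x]))
                    (if x = '?' then "QUEST".toList else [x]))
                (if x = '-' then "HYPH".toList else [x]))
            (if x = '*' then "STAR".toList else [x]))
        (if c = '/' then "SLASH".toList else [c])
      = pvMapping.getD c [c] := by
  by_cases h1 : c = '/'
  · subst h1; decide
  by_cases h2 : c = '*'
  · subst h2; decide
  by_cases h3 : c = '-'
  · subst h3; decide
  by_cases h4 : c = '?'
  · subst h4; decide
  by_cases h5 : c = '.'
  · subst h5; decide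
  by_cases h6 : c = '_'
  · subst h6; decide
  have e1 : ('/' == c) = false := by simpa using Ne.symm h1
  have e2 : ('*' == c) = false := by simpa using Ne.symm h2
  have e3 : ('-' == c) = false := by simpa using Ne.symm h3
  have e4 : ('?' == c) = false := by simpa using Ne.symm h4
  have e5 : ('.' == c) = false := by simpa using Ne.symm h5
  have e6 : ('_' == c) = false := by simpa using Ne.symm h6
  simp [h1, h2, h3, h4, h5, h6, pvMapping, PySem.Dict.getD, PySem.Dict.get?, List.find?,
        e1, e2, e3, e4, e5, e6]

lemma key_chars_eq (cs : List Char) :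
    (((((cs.flatMap (fun x => if x = '/' then "SLASH".toList else [x])).flatMap
        (fun x => if x = '*' then "STAR".toList else [x])).flatMap
        (fun x => if x = '-' then "HYPH".toList else [x])).flatMap
        (fun x => if x = '?' then "QUEST".toList else [x])).flatMap
        (fun x => if x = '.' then "DOT".toList else [x])).flatMap
        (fun x => if x = '_' then "USCORE".toList else [x])
      = cs.flatMap (fun c => pvMapping.getD c [c]) := by
  simp only [List.flatMap_assoc]
  exact List.flatMap_congr (fun c _ => chain_char c)

lemma keys_eq (s : String) :
    (List.foldl (fun k (p : String × String) => PySem.Str.replace k p.1 p.2) s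
      [("/", "SLASH"), ("*", "STAR"), ("-", "HYPH"), ("?", "QUEST"), (".", "DOT"), ("_", "USCORE")])
    = String.ofList (PySem.Chars.join []
        (s.toList.foldl (fun acc c => acc ++ [pvMapping.getD c [c]]) [])) := by
  apply String.toList_inj.mp
  rw [PySem.List.foldl_append_singleton_eq_map, join_nil_flatten]
  simp only [List.foldl_cons, List.foldl_nil, PySem.Str.toList_replace]
  rw [show ("/" : String).toList = ['/'] from rfl, show ("*" : String).toList = ['*'] from rfl,
      show ("-" : String).toList = ['-'] from rfl, show ("?" : String).toList = ['?'] from rfl,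
      show ("." : String).toList = ['.'] from rfl, show ("_" : String).toList = ['_'] from rfl]
  rw [replace_single, replace_single, replace_single, replace_single, replace_single, replace_single]
  rw [key_chars_eq]
  simp [List.flatMap_def]

-- ===== VERDICT (by name: the statement is the Claim_ definition above) =====
theorem replace_not_allowed_char_spec : Claim_equal_replace_not_allowed_char := by
  intro s _ _
  unfold Spec_replace_not_allowed_char
  simp only [replace_not_allowed_char, replace_not_allowed_char_alt, keys_eq]
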